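-- pv_equiv track=rewrite | github.com/MGhassab/True-Value-Deductive-Fault-Simulation | utils_tvs.py | split_circuit
-- ===== SOURCE A (Python) =====
-- def split_circuit(circuit_data):
--     input_list = []
--     gate_list = []
--     fanout_list = []
--     output_list = []
--     for e in circuit_data:
--         if e[0] == "INPUT":
--             input_list.extend(e[1:])
--         elif e[0] == "FANOUT":
--             fanout_list.append(e)
--         elif e[0] == "OUTPUT":
--             output_list.extend(e[1:])
--         else:
--             gate_list.append(e)
--     return input_list, gate_list, fanout_list, output_list
-- ===== SOURCE B (Python) =====
-- def split_circuit(circuit_data):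
--     # Stable sort by category rank, then cut the sorted list into the four
--     # contiguous category blocks by counting; stability preserves original order.
--     order = {"INPUT": 0, "FANOUT": 2, "OUTPUT": 3}
--     def cat(e):
--         return order.get(e[0], 1)
--     ordered = sorted(circuit_data, key=cat)
--     cats = [cat(e) for e in ordered]
--     b1 = cats.count(0)
--     b2 = b1 + cats.count(1)
--     b3 = b2 + cats.count(2)
--     input_list = [x for e in ordered[:b1] for x in e[1:]]
--     gate_list = ordered[b1:b2]
--     fanout_list = ordered[b2:b3]
--     output_list = [x for e in ordered[b3:] for x in e[1:]]
--     return input_list, gate_list, fanout_list, output_list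
-- ===== Notes on version B (the rewrite author's own statement) =====
-- stated objective: alternative
-- what changed: Instead of one categorizing loop with four accumulators, B stable-sorts the elements by a category rank (INPUT<gate<FANOUT<OUTPUT) and then cuts the sorted list into the four contiguous blocks by category counts, flattening the INPUT/OUTPUT blocks.
import Mathlib
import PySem

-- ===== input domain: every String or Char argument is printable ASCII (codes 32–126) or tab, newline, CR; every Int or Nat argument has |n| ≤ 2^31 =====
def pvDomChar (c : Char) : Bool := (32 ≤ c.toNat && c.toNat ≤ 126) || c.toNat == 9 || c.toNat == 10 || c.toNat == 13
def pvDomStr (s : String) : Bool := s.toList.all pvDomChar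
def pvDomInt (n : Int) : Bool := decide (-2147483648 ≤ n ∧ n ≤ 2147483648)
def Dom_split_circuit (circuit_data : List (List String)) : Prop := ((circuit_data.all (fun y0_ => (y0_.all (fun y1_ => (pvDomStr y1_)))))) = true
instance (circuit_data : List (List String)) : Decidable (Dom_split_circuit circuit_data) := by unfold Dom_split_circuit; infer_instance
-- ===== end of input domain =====

-- B replaces A's single categorizing loop by a stable sort on a category rank followed
-- by cutting the sorted list into the four contiguous blocks by counts (alternative algorithm).

-- ===== PORT A =====
-- One pass; e[0] → headD "" is exact under Pre_ (no empty element lists); e[1:] → drop 1.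
def splitStepA (s : List String × List (List String) × List (List String) × List String)
    (e : List String) : List String × List (List String) × List (List String) × List String :=
  if e.headD "" == "INPUT" then (s.1 ++ e.drop 1, s.2.1, s.2.2.1, s.2.2.2)
  else if e.headD "" == "FANOUT" then (s.1, s.2.1, s.2.2.1 ++ [e], s.2.2.2)
  else if e.headD "" == "OUTPUT" then (s.1, s.2.1, s.2.2.1, s.2.2.2 ++ e.drop 1)
  else (s.1, s.2.1 ++ [e], s.2.2.1, s.2.2.2)

def split_circuit (circuit_data : List (List String)) : List String × List (List String) × List (List String) × List String :=
  circuit_data.foldl splitStepA ([], [], [], [])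

-- ===== PORT B =====
-- the dict literal {"INPUT": 0, "FANOUT": 2, "OUTPUT": 3}
def catOrder : PySem.Dict String Nat := ⟨[("INPUT", 0), ("FANOUT", 2), ("OUTPUT", 3)]⟩
-- cat(e) = order.get(e[0], 1); e[0] → headD "" is exact under Pre_ (no empty element lists)
def catB (e : List String) : Nat := PySem.Dict.getD catOrder (e.headD "") 1

def split_circuit_alt (circuit_data : List (List String)) : List String × List (List String) × List (List String) × List String :=
  let ordered := PySem.List.sorted circuit_data catB
  let cats := ordered.map catB
  let b1 := PySem.List.count cats 0
  let b2 := b1 + PySem.List.count cats 1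
  let b3 := b2 + PySem.List.count cats 2
  ((PySem.List.slice ordered none (some (b1 : Int))).flatMap (fun e => e.drop 1),
   PySem.List.slice ordered (some (b1 : Int)) (some (b2 : Int)),
   PySem.List.slice ordered (some (b2 : Int)) (some (b3 : Int)),
   (PySem.List.slice ordered (some (b3 : Int)) none).flatMap (fun e => e.drop 1))

-- ===== PRECONDITION & SPEC =====
-- Pre_ excludes inputs containing an empty element list, on which Python A raises IndexError at e[0].
def Pre_split_circuit (circuit_data : List (List String)) : Prop := ∀ e ∈ circuit_data, e ≠ []
instance (circuit_data : List (List String)) : Decidable (Pre_split_circuit circuit_data) := by unfold Pre_split_circuit; infer_instance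
def pvWitness_split_circuit : List (List String) := [["INPUT", "a"], ["AND", "c", "a"], ["FANOUT", "c", "d"], ["OUTPUT", "d"]]
def Spec_split_circuit (circuit_data : List (List String)) (out : List String × List (List String) × List (List String) × List String) : Prop := out = split_circuit_alt circuit_data
instance (circuit_data : List (List String)) (out : List String × List (List String) × List (List String) × List String) : Decidable (Spec_split_circuit circuit_data out) := by unfold Spec_split_circuit; infer_instance

-- ===== CLAIM (what is proved, stated in full; the proofs are below) =====
def Claim_equal_split_circuit : Prop := ∀ (circuit_data : List (List String)), Dom_split_circuit circuit_data → Pre_split_circuit circuit_data → Spec_split_circuit circuit_data (split_circuit circuit_data)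

-- ===== LEMMAS AND PROOFS =====

-- catB in closed form
theorem catB_eq (e : List String) :
    catB e = if e.headD "" == "INPUT" then 0
      else if e.headD "" == "FANOUT" then 2
      else if e.headD "" == "OUTPUT" then 3 else 1 := by
  unfold catB
  generalize e.headD "" = s
  by_cases hI : s = "INPUT"
  · subst hI; decide
  by_cases hF : s = "FANOUT"
  · subst hF; decide
  by_cases hO : s = "OUTPUT"
  · subst hO; decide
  have bI : ("INPUT" == s) = false := by simpa using fun h => hI h.symm
  have bF : ("FANOUT" == s) = false := by simpa using fun h => hF h.symm
  have bO : ("OUTPUT" == s) = false := by simpa using fun h => hO h.symm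
  simp [catOrder, PySem.Dict.getD, PySem.Dict.get?, bI, bF, bO, hI, hF, hO]

theorem catB_le (e : List String) : catB e ≤ 3 := by
  rw [catB_eq]; split_ifs <;> omega

-- shorthand for the category filters
def catFil (cd : List (List String)) (i : Nat) : List (List String) :=
  cd.filter (fun e => catB e == i)

theorem mem_catFil (cd : List (List String)) (i : Nat) (y : List String)
    (hy : y ∈ catFil cd i) : catB y = i := by
  have := List.of_mem_filter hy
  simpa using this

-- insertBy passes over a block whose elements it does not go before
theorem insertBy_append_left (before : List String → List String → Bool)
    (x : List String) (L R : List (List String)) (h : ∀ y ∈ L, before x y = false) :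
    PySem.List.insertBy before x (L ++ R) = L ++ PySem.List.insertBy before x R := by
  induction L with
  | nil => simp
  | cons a t ih =>
    simp only [List.cons_append, PySem.List.insertBy, h a (by simp)]
    simp [ih (fun y hy => h y (by simp [hy]))]

theorem insertBy_all_before (before : List String → List String → Bool)
    (x : List String) (R : List (List String)) (h : ∀ y ∈ R, before x y = true) :
    PySem.List.insertBy before x R = x :: R := by
  cases R with
  | nil => simp [PySem.List.insertBy]
  | cons a t => simp [PySem.List.insertBy, h a (by simp)]

-- the stable sort by catB is the concatenation of the four category filters
theorem sorted_cat_eq (cd : List (List String)) :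
    PySem.List.sorted cd catB =
      catFil cd 0 ++ catFil cd 1 ++ catFil cd 2 ++ catFil cd 3 := by
  rw [PySem.List.sorted_eq_foldl_insertBy]
  induction cd using List.reverseRecOn with
  | nil => simp [catFil]
  | append_singleton t x ih =>
    rw [List.foldl_append, List.foldl_cons, List.foldl_nil, ih]
    have hx := catB_le x
    have hfil : ∀ i, catFil (t ++ [x]) i =
        catFil t i ++ (if catB x = i then [x] else []) := by
      intro i
      simp only [catFil, List.filter_append, List.filter_cons, List.filter_nil]
      split_ifs with h1 h2 h2 <;> simp_all
    interval_cases h : catB x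
    · rw [show catFil t 0 ++ catFil t 1 ++ catFil t 2 ++ catFil t 3 =
          catFil t 0 ++ (catFil t 1 ++ catFil t 2 ++ catFil t 3) by simp,
        insertBy_append_left _ _ _ _ (by
          intro y hy; simp [mem_catFil t 0 y hy, h]),
        insertBy_all_before _ _ _ (by
          intro y hy
          simp only [List.mem_append] at hy
          rcases hy with (hy | hy) | hy <;> simp [mem_catFil _ _ _ hy, h])]
      simp [hfil]
    · rw [show catFil t 0 ++ catFil t 1 ++ catFil t 2 ++ catFil t 3 =
          (catFil t 0 ++ catFil t 1) ++ (catFil t 2 ++ catFil t 3) by simp,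
        insertBy_append_left _ _ _ _ (by
          intro y hy
          simp only [List.mem_append] at hy
          rcases hy with hy | hy <;> simp [mem_catFil _ _ _ hy, h]),
        insertBy_all_before _ _ _ (by
          intro y hy
          simp only [List.mem_append] at hy
          rcases hy with hy | hy <;> simp [mem_catFil _ _ _ hy, h])]
      simp [hfil]
    · rw [show catFil t 0 ++ catFil t 1 ++ catFil t 2 ++ catFil t 3 =
          (catFil t 0 ++ catFil t 1 ++ catFil t 2) ++ catFil t 3 by simp,
        insertBy_append_left _ _ _ _ (by
          intro y hy
          simp only [List.mem_append] at hy
          rcases hy with (hy | hy) | hy <;> simp [mem_catFil _ _ _ hy, h]),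
        insertBy_all_before _ _ _ (by
          intro y hy; simp [mem_catFil t 3 y hy, h])]
      simp [hfil]
    · rw [show catFil t 0 ++ catFil t 1 ++ catFil t 2 ++ catFil t 3 =
          (catFil t 0 ++ catFil t 1 ++ catFil t 2 ++ catFil t 3) ++ [] by simp,
        insertBy_append_left _ _ _ _ (by
          intro y hy
          simp only [List.append_assoc, List.mem_append] at hy
          rcases hy with hy | hy | hy | hy <;> simp [mem_catFil _ _ _ hy, h])]
      simp [PySem.List.insertBy, hfil]

-- counting a category over a block's category tags
theorem count_map_catFil (cd : List (List String)) (i : Nat) :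
    List.count i ((catFil cd i).map catB) = (catFil cd i).length := by
  have h : ∀ b ∈ (catFil cd i).map catB, i = b := by
    intro b hb
    simp only [List.mem_map] at hb
    obtain ⟨y, hy, rfl⟩ := hb
    exact (mem_catFil cd i y hy).symm
  rw [show (catFil cd i).length = ((catFil cd i).map catB).length by simp]
  exact List.count_eq_length.mpr h

theorem count_map_catFil_ne (cd : List (List String)) (i j : Nat) (hne : i ≠ j) :
    List.count j ((catFil cd i).map catB) = 0 := by
  rw [List.count_eq_zero]
  intro hj
  simp only [List.mem_map] at hj
  obtain ⟨y, hy, hb⟩ := hj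
  exact hne (by rw [← mem_catFil cd i y hy, hb])

-- A's single pass in closed form (same filters)
theorem splitA_inv (cd : List (List String)) (i o : List String) (g f : List (List String)) :
    cd.foldl splitStepA (i, g, f, o) =
      (i ++ (cd.filter (fun e => e.headD "" == "INPUT")).flatMap (fun e => e.drop 1),
       g ++ cd.filter (fun e => !(e.headD "" == "INPUT" || e.headD "" == "FANOUT" || e.headD "" == "OUTPUT")),
       f ++ cd.filter (fun e => e.headD "" == "FANOUT"),
       o ++ (cd.filter (fun e => e.headD "" == "OUTPUT")).flatMap (fun e => e.drop 1)) := by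
  induction cd generalizing i g f o with
  | nil => simp
  | cons e t ih =>
    simp only [List.foldl_cons, splitStepA]
    by_cases h1 : e.headD "" == "INPUT" <;> by_cases h2 : e.headD "" == "FANOUT" <;>
      by_cases h3 : e.headD "" == "OUTPUT" <;>
      simp_all [List.flatMap_cons]

-- the category filters coincide with A's tag filters
theorem catFil_eq_tag (cd : List (List String)) :
    catFil cd 0 = cd.filter (fun e => e.headD "" == "INPUT") ∧
    catFil cd 1 = cd.filter (fun e => !(e.headD "" == "INPUT" || e.headD "" == "FANOUT" || e.headD "" == "OUTPUT")) ∧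
    catFil cd 2 = cd.filter (fun e => e.headD "" == "FANOUT") ∧
    catFil cd 3 = cd.filter (fun e => e.headD "" == "OUTPUT") := by
  refine ⟨?_, ?_, ?_, ?_⟩ <;>
  · unfold catFil
    apply List.filter_congr
    intro e _
    rw [catB_eq]
    split_ifs <;> simp_all

-- B's sorted/count/slice pipeline in closed form
theorem alt_closed (cd : List (List String)) :
    split_circuit_alt cd =
      ((catFil cd 0).flatMap (fun e => e.drop 1), catFil cd 1, catFil cd 2,
       (catFil cd 3).flatMap (fun e => e.drop 1)) := by
  simp only [split_circuit_alt]
  rw [sorted_cat_eq cd]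
  have hc : ∀ i, PySem.List.count
      ((catFil cd 0 ++ catFil cd 1 ++ catFil cd 2 ++ catFil cd 3).map catB) i =
      List.count i ((catFil cd 0).map catB) + List.count i ((catFil cd 1).map catB)
        + List.count i ((catFil cd 2).map catB) + List.count i ((catFil cd 3).map catB) := by
    intro i
    simp [PySem.List.count, List.count_append]
    omega
  rw [hc 0, hc 1, hc 2,
    count_map_catFil cd 0, count_map_catFil cd 1, count_map_catFil cd 2,
    count_map_catFil_ne cd 1 0 (by omega), count_map_catFil_ne cd 2 0 (by omega),
    count_map_catFil_ne cd 3 0 (by omega),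
    count_map_catFil_ne cd 0 1 (by omega), count_map_catFil_ne cd 2 1 (by omega),
    count_map_catFil_ne cd 3 1 (by omega),
    count_map_catFil_ne cd 0 2 (by omega), count_map_catFil_ne cd 1 2 (by omega),
    count_map_catFil_ne cd 3 2 (by omega)]
  simp only [Nat.add_zero, Nat.zero_add]
  rw [PySem.List.slice_to_natCast, PySem.List.slice_natCast, PySem.List.slice_natCast,
    PySem.List.slice_from_natCast]
  have t0 : (catFil cd 0 ++ catFil cd 1 ++ catFil cd 2 ++ catFil cd 3).take (catFil cd 0).length
      = catFil cd 0 := by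
    rw [show catFil cd 0 ++ catFil cd 1 ++ catFil cd 2 ++ catFil cd 3
        = catFil cd 0 ++ (catFil cd 1 ++ catFil cd 2 ++ catFil cd 3) by simp]
    exact List.take_left
  have d0 : (catFil cd 0 ++ catFil cd 1 ++ catFil cd 2 ++ catFil cd 3).drop (catFil cd 0).length
      = catFil cd 1 ++ (catFil cd 2 ++ catFil cd 3) := by
    rw [show catFil cd 0 ++ catFil cd 1 ++ catFil cd 2 ++ catFil cd 3
        = catFil cd 0 ++ (catFil cd 1 ++ (catFil cd 2 ++ catFil cd 3)) by simp]
    exact List.drop_left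
  have d1 : (catFil cd 0 ++ catFil cd 1 ++ catFil cd 2 ++ catFil cd 3).drop
        ((catFil cd 0).length + (catFil cd 1).length)
      = catFil cd 2 ++ catFil cd 3 := by
    rw [show catFil cd 0 ++ catFil cd 1 ++ catFil cd 2 ++ catFil cd 3
        = (catFil cd 0 ++ catFil cd 1) ++ (catFil cd 2 ++ catFil cd 3) by simp,
      show (catFil cd 0).length + (catFil cd 1).length = (catFil cd 0 ++ catFil cd 1).length by
        simp only [List.length_append]]
    exact List.drop_left
  have d2 : (catFil cd 0 ++ catFil cd 1 ++ catFil cd 2 ++ catFil cd 3).drop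
        ((catFil cd 0).length + (catFil cd 1).length + (catFil cd 2).length)
      = catFil cd 3 := by
    rw [show catFil cd 0 ++ catFil cd 1 ++ catFil cd 2 ++ catFil cd 3
        = (catFil cd 0 ++ catFil cd 1 ++ catFil cd 2) ++ catFil cd 3 by simp,
      show (catFil cd 0).length + (catFil cd 1).length + (catFil cd 2).length
        = (catFil cd 0 ++ catFil cd 1 ++ catFil cd 2).length by
        simp only [List.length_append]]
    exact List.drop_left
  rw [t0, d0, d1, d2,
    show (catFil cd 0).length + (catFil cd 1).length - (catFil cd 0).length
      = (catFil cd 1).length by omega,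
    show (catFil cd 0).length + (catFil cd 1).length + (catFil cd 2).length
        - ((catFil cd 0).length + (catFil cd 1).length) = (catFil cd 2).length by omega,
    List.take_left, List.take_left]

-- ===== VERDICT (by name: the statement is the Claim_ definition above) =====
theorem split_circuit_spec : Claim_equal_split_circuit := by
  intro cd _ _
  unfold Spec_split_circuit split_circuit
  obtain ⟨h0, h1, h2, h3⟩ := catFil_eq_tag cd
  rw [splitA_inv cd [] [] [] [], alt_closed cd, h0, h1, h2, h3]
  simp
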